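-- pv_equiv track=rewrite | github.com/sskhan67/GPGPU-Programming- | QODE/Applications/Be_n/attic/H2_2_FCI/mol_fci/excite_strings.py | _make_excite_strings
-- ===== SOURCE A (Python) =====
-- from copy import copy
--
-- def _make_excite_strings(excite_string,n_states):
-- 	"""\
-- 	This is a workhorse function, not likely to be of use to a caller outside of this file.
-- 	Given a configuration (list of states) for N molecules, it returns a list of configurations for
-- 	N+1 molecules, where the additional molecule can be in any one of n_states[0] states.
-- 	"""
-- 	the_list = []
-- 	if len(n_states)==0:
-- 		return [excite_string]
-- 	else:
-- 		for n in range(n_states[0]):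
-- 			excite_string_temp = copy(excite_string)
-- 			excite_string_temp += [n]
-- 			the_list += _make_excite_strings(excite_string_temp,n_states[1:])
-- 	return the_list
-- ===== SOURCE B (Python) =====
-- def _make_excite_strings(excite_string, n_states):
--     # Iterative breadth-wise build of the Cartesian product instead of recursion.
--     result = [[]]
--     for n in n_states:
--         result = [r + [x] for r in result for x in range(n)]
--     return [excite_string + r for r in result]
-- ===== Notes on version B (the rewrite author's own statement) =====
-- stated objective: simpler
-- what changed: Replaced the depth-first recursion over n_states[1:] by an iterative breadth-wise build: start from [[]], extend every partial configuration by one level per n_states entry, then prefix excite_string once.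
import Mathlib
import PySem

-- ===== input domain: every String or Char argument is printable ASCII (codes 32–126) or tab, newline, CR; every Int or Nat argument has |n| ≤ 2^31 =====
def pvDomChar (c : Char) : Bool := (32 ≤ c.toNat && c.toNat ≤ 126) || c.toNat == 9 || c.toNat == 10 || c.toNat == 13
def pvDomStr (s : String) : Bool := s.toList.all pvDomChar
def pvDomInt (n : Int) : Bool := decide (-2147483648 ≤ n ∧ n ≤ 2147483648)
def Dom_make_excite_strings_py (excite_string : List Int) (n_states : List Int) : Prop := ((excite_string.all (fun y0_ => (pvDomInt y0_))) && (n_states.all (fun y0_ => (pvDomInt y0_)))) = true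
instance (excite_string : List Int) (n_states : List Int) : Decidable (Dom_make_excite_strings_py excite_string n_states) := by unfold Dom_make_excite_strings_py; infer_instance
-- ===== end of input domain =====

-- B replaces A's depth-first recursion by an iterative breadth-wise product build (objective: simpler).
-- ===== PORT A =====
def make_excite_strings_py (excite_string : List Int) (n_states : List Int) : List (List Int) :=
  match n_states with
  | [] => [excite_string]
  | n :: rest =>
    -- the_list = []; for n in range(n_states[0]): the_list += recurse(excite_string+[n], n_states[1:])
    (PySem.List.pyRange 0 n 1).foldl
      (fun the_list k => the_list ++ make_excite_strings_py (excite_string ++ [k]) rest) []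

-- ===== PORT B =====
def make_excite_strings_py_alt (excite_string : List Int) (n_states : List Int) : List (List Int) :=
  -- result = [[]]; for n in n_states: result = [r + [x] for r in result for x in range(n)]
  let result := n_states.foldl
    (fun result n => result.flatMap (fun r => (PySem.List.pyRange 0 n 1).map (fun x => r ++ [x])))
    [[]]
  result.map (fun r => excite_string ++ r)

-- ===== PRECONDITION & SPEC =====
def Spec_make_excite_strings_py (excite_string : List Int) (n_states : List Int) (out : List (List Int)) : Prop := out = make_excite_strings_py_alt excite_string n_states
instance (excite_string : List Int) (n_states : List Int) (out : List (List Int)) : Decidable (Spec_make_excite_strings_py excite_string n_states out) := by unfold Spec_make_excite_strings_py; infer_instance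

-- ===== CLAIM (what is proved, stated in full; the proofs are below) =====
def Claim_equal_make_excite_strings_py : Prop := ∀ (excite_string : List Int) (n_states : List Int), Dom_make_excite_strings_py excite_string n_states → Spec_make_excite_strings_py excite_string n_states (make_excite_strings_py excite_string n_states)

-- ===== LEMMAS AND PROOFS =====

-- abstract product: the common value both ports compute, up to the excite_string prefix
def pvProd : List Int → List (List Int)
  | [] => [[]]
  | n :: rest => (PySem.List.pyRange 0 n 1).flatMap (fun x => (pvProd rest).map (fun r => x :: r))

theorem portA_eq_map (n_states : List Int) : ∀ (es : List Int),
    make_excite_strings_py es n_states = (pvProd n_states).map (fun r => es ++ r) := by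
  induction n_states with
  | nil => intro es; simp [make_excite_strings_py, pvProd]
  | cons n rest ih =>
    intro es
    simp [make_excite_strings_py, pvProd, PySem.List.foldl_append_eq_flatMap, ih,
      List.map_flatMap, List.flatMap_def, List.map_map, Function.comp_def]

theorem portB_foldl (n_states : List Int) : ∀ (acc : List (List Int)),
    n_states.foldl
      (fun result n => result.flatMap (fun r => (PySem.List.pyRange 0 n 1).map (fun x => r ++ [x])))
      acc = acc.flatMap (fun r => (pvProd n_states).map (fun t => r ++ t)) := by
  induction n_states with
  | nil => intro acc; simp [pvProd]
  | cons n rest ih =>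
    intro acc
    simp [List.foldl_cons, ih, pvProd, List.map_flatMap, List.flatMap_map,
      List.flatMap_assoc, List.map_map, Function.comp_def, List.append_assoc,
      List.singleton_append]

-- ===== VERDICT (by name: the statement is the Claim_ definition above) =====
theorem make_excite_strings_py_spec : Claim_equal_make_excite_strings_py := by
  intro es ns _
  unfold Spec_make_excite_strings_py make_excite_strings_py_alt
  simp [portA_eq_map, portB_foldl]
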